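-- pv_equiv track=rewrite | github.com/RickMolenaar/AdventOfCode2024 | day21.py | get_path_by_locs
-- ===== SOURCE A (Python) =====
-- def get_path_by_locs(locs, forbidden, debug = False):
--     if len(locs) == 1:
--         return ''
--     elif locs[0] == locs[1]:
--         return 'A' + get_path_by_locs(locs[1:], forbidden, debug)
--     else:
--         l1, l2 = locs[:2]
--         dx, dy = l2[0] - l1[0], l2[1] - l1[1]
--         options = []
--         if dx > 0:
--             options.append(('>' * dx, (dx, 0)))
--         elif dx < 0:
--             options.append(('<' * abs(dx), (dx, 0)))
--         if dy > 0:
--             options.append(('v' * dy, (0, dy)))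
--         elif dy < 0:
--             options.append(('^' * abs(dy), (0, dy)))
--         for key, dir in options:
--             nx, ny = l1[0] + dir[0], l1[1] + dir[1]
--             if (nx, ny) == l2:
--                 # for path in :
--                 return key + 'A' + get_path_by_locs(locs[1:], forbidden, debug)
--             elif (nx, ny) != forbidden:
--                 # for path in :
--                 return key + get_path_by_locs([(nx, ny)] + locs[1:], forbidden, debug)
-- ===== SOURCE B (Python) =====
-- def get_path_by_locs(locs, forbidden, debug=False):
--     parts = []
--     for (x1, y1), (x2, y2) in zip(locs, locs[1:]):
--         dx, dy = x2 - x1, y2 - y1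
--         h = '>' * dx if dx > 0 else '<' * -dx
--         v = 'v' * dy if dy > 0 else '^' * -dy
--         seg = v + h if dx and dy and (x2, y1) == forbidden else h + v
--         parts.append(seg + 'A')
--     return ''.join(parts)
-- ===== Notes on version B (the rewrite author's own statement) =====
-- stated objective: faster
-- what changed: Replaces A's recursion, which rebuilds the list each step (slicing the tail and re-recursing through an inserted intermediate point when the horizontal move is taken first), with a single loop over consecutive pairs that emits each segment's horizontal/vertical run directly, ordering them vertical-first exactly when both axes move and the horizontal corner is the forbidden cell.
import Mathlib
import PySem

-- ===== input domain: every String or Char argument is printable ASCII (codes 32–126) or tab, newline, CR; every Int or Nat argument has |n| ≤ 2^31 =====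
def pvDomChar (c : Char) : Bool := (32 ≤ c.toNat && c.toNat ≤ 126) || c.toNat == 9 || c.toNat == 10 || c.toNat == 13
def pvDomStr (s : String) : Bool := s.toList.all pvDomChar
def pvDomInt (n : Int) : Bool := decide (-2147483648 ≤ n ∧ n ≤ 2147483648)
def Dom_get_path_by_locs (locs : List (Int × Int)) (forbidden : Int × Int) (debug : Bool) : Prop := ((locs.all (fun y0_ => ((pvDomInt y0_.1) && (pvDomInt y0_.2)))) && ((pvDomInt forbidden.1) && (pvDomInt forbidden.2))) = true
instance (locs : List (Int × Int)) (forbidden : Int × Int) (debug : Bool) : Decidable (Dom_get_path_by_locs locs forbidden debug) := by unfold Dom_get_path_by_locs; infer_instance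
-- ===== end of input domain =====

-- B replaces A's recursion (which re-recurses through an inserted intermediate point and
-- copies the list tail at every step) by a single pass over consecutive pairs that emits
-- each segment directly: simpler, and no per-step list slicing.

-- ===== SHARED HELPERS =====

-- 'c * n' for a Python one-char string (n ≤ 0 gives '')
def pvRepl (c : Char) (n : Int) : String := String.ofList (List.replicate n.toNat c)

-- ">"*dx if dx > 0 else "<"*-dx   (B's h; also the key of A's horizontal option)
def pvH (a b : Int × Int) : String :=
  if b.1 - a.1 > 0 then pvRepl '>' (b.1 - a.1) else pvRepl '<' (-(b.1 - a.1))

-- "v"*dy if dy > 0 else "^"*-dy   (B's v; also the key of A's vertical option)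
def pvV (a b : Int × Int) : String :=
  if b.2 - a.2 > 0 then pvRepl 'v' (b.2 - a.2) else pvRepl '^' (-(b.2 - a.2))

-- ===== PORT A =====

-- the 'options' list A builds from dx, dy (same order: horizontal first)
def pvOptions (dx dy : Int) : List (String × (Int × Int)) :=
  (if dx > 0 then [(pvRepl '>' dx, (dx, 0))]
   else if dx < 0 then [(pvRepl '<' (-dx), (dx, 0))] else [])
  ++ (if dy > 0 then [(pvRepl 'v' dy, (0, dy))]
      else if dy < 0 then [(pvRepl '^' (-dy), (0, dy))] else [])

-- A's 'for key, dir in options' loop, hoisted out: the first option taken, with a flag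
-- telling which return fires (true = landed on l2, so 'A' is appended)
def pvPick (l1 l2 forbidden : Int × Int) : List (String × (Int × Int)) → Option (String × Bool × (Int × Int))
  | [] => none
  | (key, dir) :: rest =>
    if (l1.1 + dir.1, l1.2 + dir.2) = l2 then some (key, true, (l1.1 + dir.1, l1.2 + dir.2))
    else if (l1.1 + dir.1, l1.2 + dir.2) ≠ forbidden then some (key, false, (l1.1 + dir.1, l1.2 + dir.2))
    else pvPick l1 l2 forbidden rest

-- termination measure bonus: +1 when the first two points differ in both coordinates
def pvExtra : List (Int × Int) → Nat
  | a :: b :: _ => if a.1 ≠ b.1 ∧ a.2 ≠ b.2 then 1 else 0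
  | _ => 0

-- the lemmas below are cited by the port's decreasing_by (they also serve the equivalence proof)
theorem pvExtra_le_one (l : List (Int × Int)) : pvExtra l ≤ 1 := by
  unfold pvExtra
  split
  · split <;> simp
  · simp

theorem pick_horiz (a b f : Int × Int) (h2 : a.2 = b.2) (h1 : a.1 ≠ b.1) :
    pvPick a b f (pvOptions (b.1 - a.1) (b.2 - a.2)) = some (pvH a b, true, b) := by
  have hb : ((a.1 + (b.1 - a.1 : Int), a.2 + (0:Int)) : Int × Int) = b := by
    rw [Prod.ext_iff]; constructor
    · omega
    · simpa using h2
  rcases lt_or_gt_of_ne (show b.1 - a.1 ≠ 0 by omega) with hdx | hdx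
  · have ho : pvOptions (b.1 - a.1) (b.2 - a.2) = [(pvRepl '<' (-(b.1 - a.1)), (b.1 - a.1, 0))] := by
      rw [pvOptions, if_neg (by omega), if_pos hdx, if_neg (by omega), if_neg (by omega)]
      simp
    rw [ho, pvPick]
    simp only []
    rw [if_pos hb, hb, pvH, if_neg (by omega)]
  · have ho : pvOptions (b.1 - a.1) (b.2 - a.2) = [(pvRepl '>' (b.1 - a.1), (b.1 - a.1, 0))] := by
      rw [pvOptions, if_pos hdx, if_neg (by omega), if_neg (by omega)]
      simp
    rw [ho, pvPick]
    simp only []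
    rw [if_pos hb, hb, pvH, if_pos hdx]

theorem pick_vert (a b f : Int × Int) (h1 : a.1 = b.1) (h2 : a.2 ≠ b.2) :
    pvPick a b f (pvOptions (b.1 - a.1) (b.2 - a.2)) = some (pvV a b, true, b) := by
  have hb : ((a.1 + (0:Int), a.2 + (b.2 - a.2 : Int)) : Int × Int) = b := by
    rw [Prod.ext_iff]; constructor
    · simpa using h1
    · omega
  rcases lt_or_gt_of_ne (show b.2 - a.2 ≠ 0 by omega) with hdy | hdy
  · have ho : pvOptions (b.1 - a.1) (b.2 - a.2) = [(pvRepl '^' (-(b.2 - a.2)), (0, b.2 - a.2))] := by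
      rw [pvOptions, if_neg (by omega), if_neg (by omega), if_neg (by omega), if_pos hdy]
      simp
    rw [ho, pvPick]
    simp only []
    rw [if_pos hb, hb, pvV, if_neg (by omega)]
  · have ho : pvOptions (b.1 - a.1) (b.2 - a.2) = [(pvRepl 'v' (b.2 - a.2), (0, b.2 - a.2))] := by
      rw [pvOptions, if_neg (by omega), if_neg (by omega), if_pos hdy]
      simp
    rw [ho, pvPick]
    simp only []
    rw [if_pos hb, hb, pvV, if_pos hdy]

theorem pvOptions_mixed (dx dy : Int) (hdx : dx ≠ 0) (hdy : dy ≠ 0) :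
    pvOptions dx dy = [((if dx > 0 then pvRepl '>' dx else pvRepl '<' (-dx)), (dx, 0)),
                       ((if dy > 0 then pvRepl 'v' dy else pvRepl '^' (-dy)), (0, dy))] := by
  rw [pvOptions]
  rcases lt_or_gt_of_ne hdx with h | h <;> rcases lt_or_gt_of_ne hdy with h' | h' <;>
    simp [h, h', not_lt_of_gt]

theorem pick_mixed_ok (a b f : Int × Int) (h1 : a.1 ≠ b.1) (h2 : a.2 ≠ b.2)
    (hf : ((b.1, a.2) : Int × Int) ≠ f) :
    pvPick a b f (pvOptions (b.1 - a.1) (b.2 - a.2)) = some (pvH a b, false, (b.1, a.2)) := by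
  have hl : ((a.1 + (b.1 - a.1 : Int), a.2 + (0:Int)) : Int × Int) = (b.1, a.2) := by
    rw [Prod.ext_iff]; constructor <;> simp
  rw [pvOptions_mixed _ _ (by omega) (by omega), pvPick]
  simp only []
  rw [if_neg (by rw [hl, Prod.ext_iff]; intro h; exact h2 h.2), if_pos (by rw [hl]; exact hf), hl, pvH]

theorem pick_mixed_forb (a b f : Int × Int) (h1 : a.1 ≠ b.1) (h2 : a.2 ≠ b.2)
    (hf : ((b.1, a.2) : Int × Int) = f) :
    pvPick a b f (pvOptions (b.1 - a.1) (b.2 - a.2)) = some (pvV a b, false, (a.1, b.2)) := by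
  have hl : ((a.1 + (b.1 - a.1 : Int), a.2 + (0:Int)) : Int × Int) = (b.1, a.2) := by
    rw [Prod.ext_iff]; constructor <;> simp
  have hl2 : ((a.1 + (0:Int), a.2 + (b.2 - a.2 : Int)) : Int × Int) = (a.1, b.2) := by
    rw [Prod.ext_iff]; constructor <;> simp
  rw [pvOptions_mixed _ _ (by omega) (by omega), pvPick]
  simp only []
  rw [if_neg (by rw [hl, Prod.ext_iff]; intro h; exact h2 h.2),
      if_neg (by rw [hl, hf]; simp), pvPick]
  simp only []
  rw [if_neg (by rw [hl2, Prod.ext_iff]; intro h; exact h1 h.1),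
      if_pos (by rw [hl2, ← hf]; simp [Prod.ext_iff]; intro h; exact absurd h h1), hl2, pvV]

theorem pvPick_false (a b f : Int × Int) (k : String) (p : Int × Int) (hab : a ≠ b)
    (h : pvPick a b f (pvOptions (b.1 - a.1) (b.2 - a.2)) = some (k, false, p)) :
    ¬(p.1 ≠ b.1 ∧ p.2 ≠ b.2) ∧ a.1 ≠ b.1 ∧ a.2 ≠ b.2 := by
  by_cases h1 : a.1 = b.1
  · have h2 : a.2 ≠ b.2 := fun hh => hab (Prod.ext h1 hh)
    rw [pick_vert a b f h1 h2] at h; simp at h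
  · by_cases h2 : a.2 = b.2
    · rw [pick_horiz a b f h2 h1] at h; simp at h
    · by_cases hf : ((b.1, a.2) : Int × Int) = f
      · rw [pick_mixed_forb a b f h1 h2 hf] at h
        simp only [Option.some.injEq, Prod.mk.injEq] at h
        refine ⟨?_, h1, h2⟩
        rw [← h.2.2]; simp
      · rw [pick_mixed_ok a b f h1 h2 hf] at h
        simp only [Option.some.injEq, Prod.mk.injEq] at h
        refine ⟨?_, h1, h2⟩
        rw [← h.2.2]; simp

def get_path_by_locs (locs : List (Int × Int)) (forbidden : Int × Int) (debug : Bool) : String :=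
  match locs with
  | [] => ""            -- Python raises IndexError here; excluded by Pre_
  | [_] => ""
  | l1 :: l2 :: rest =>
    if hab : l1 = l2 then "A" ++ get_path_by_locs (l2 :: rest) forbidden debug
    else
      match hp : pvPick l1 l2 forbidden (pvOptions (l2.1 - l1.1) (l2.2 - l1.2)) with
      | some (key, true, _) => key ++ ("A" ++ get_path_by_locs (l2 :: rest) forbidden debug)
      | some (key, false, p) => key ++ get_path_by_locs (p :: l2 :: rest) forbidden debug
      | none => ""      -- Python falls off the loop here (returns None); unreachable
termination_by 2 * locs.length + pvExtra locs
decreasing_by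
  · have e1 := pvExtra_le_one (l2 :: rest)
    have e2 := pvExtra_le_one (l1 :: l2 :: rest)
    simp only [List.length_cons]; omega
  · have e1 := pvExtra_le_one (l2 :: rest)
    have e2 := pvExtra_le_one (l1 :: l2 :: rest)
    simp only [List.length_cons]; omega
  · obtain ⟨hc, h1, h2⟩ := pvPick_false l1 l2 forbidden key p hab hp
    have hz : pvExtra (p :: l2 :: rest) = 0 := by
      show (if p.1 ≠ l2.1 ∧ p.2 ≠ l2.2 then 1 else 0) = 0
      rw [if_neg hc]
    have ho : pvExtra (l1 :: l2 :: rest) = 1 := by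
      show (if l1.1 ≠ l2.1 ∧ l1.2 ≠ l2.2 then 1 else 0) = 1
      rw [if_pos ⟨h1, h2⟩]
    simp only [List.length_cons, hz, ho]; omega

-- ===== PORT B =====

-- one loop-body of B: the segment emitted for the pair (a, b), plus 'A'
def pvSeg (a b forbidden : Int × Int) : String :=
  (if b.1 - a.1 ≠ 0 ∧ b.2 - a.2 ≠ 0 ∧ ((b.1, a.2) : Int × Int) = forbidden
   then pvV a b ++ pvH a b else pvH a b ++ pvV a b) ++ "A"

-- ''.join(parts)
def pvJoin : List String → String
  | [] => ""
  | s :: rest => s ++ pvJoin rest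

def get_path_by_locs_alt (locs : List (Int × Int)) (forbidden : Int × Int) (debug : Bool) : String :=
  pvJoin ((locs.zip locs.tail).map (fun p => pvSeg p.1 p.2 forbidden))

-- ===== PRECONDITION & SPEC =====
-- Pre_ excludes only the empty list, on which the Python A raises IndexError (locs[0]).
def Pre_get_path_by_locs (locs : List (Int × Int)) (forbidden : Int × Int) (debug : Bool) : Prop := locs ≠ []
instance (locs : List (Int × Int)) (forbidden : Int × Int) (debug : Bool) : Decidable (Pre_get_path_by_locs locs forbidden debug) := by unfold Pre_get_path_by_locs; infer_instance
def pvWitness_get_path_by_locs : (List (Int × Int)) × (Int × Int) × Bool := ([((0:Int),(0:Int)), ((1:Int),(1:Int))], ((0:Int),(1:Int)), false)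

def Spec_get_path_by_locs (locs : List (Int × Int)) (forbidden : Int × Int) (debug : Bool) (out : String) : Prop := out = get_path_by_locs_alt locs forbidden debug
instance (locs : List (Int × Int)) (forbidden : Int × Int) (debug : Bool) (out : String) : Decidable (Spec_get_path_by_locs locs forbidden debug out) := by unfold Spec_get_path_by_locs; infer_instance

-- ===== CLAIM =====
def Claim_equal_get_path_by_locs : Prop := ∀ (locs : List (Int × Int)) (forbidden : Int × Int) (debug : Bool), Dom_get_path_by_locs locs forbidden debug → Pre_get_path_by_locs locs forbidden debug → Spec_get_path_by_locs locs forbidden debug (get_path_by_locs locs forbidden debug)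

-- ===== LEMMAS AND PROOFS =====

theorem alt_cons (a b : Int × Int) (rest : List (Int × Int)) (f : Int × Int) (d : Bool) :
    get_path_by_locs_alt (a :: b :: rest) f d = pvSeg a b f ++ get_path_by_locs_alt (b :: rest) f d := by
  simp [get_path_by_locs_alt, pvJoin]

theorem pvH_empty (a b : Int × Int) (h : a.1 = b.1) : pvH a b = "" := by
  have h0 : b.1 - a.1 = 0 := by omega
  rw [pvH, h0]; decide

theorem pvV_empty (a b : Int × Int) (h : a.2 = b.2) : pvV a b = "" := by
  have h0 : b.2 - a.2 = 0 := by omega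
  rw [pvV, h0]; decide

theorem pvSeg_self (a f : Int × Int) : pvSeg a a f = "A" := by
  rw [pvSeg, if_neg (by simp), pvH_empty a a rfl, pvV_empty a a rfl]
  decide

theorem A_step_vert (a b : Int × Int) (rest : List (Int × Int)) (f : Int × Int) (d : Bool)
    (h1 : a.1 = b.1) (h2 : a.2 ≠ b.2) :
    get_path_by_locs (a :: b :: rest) f d = pvV a b ++ ("A" ++ get_path_by_locs (b :: rest) f d) := by
  have hab : a ≠ b := fun h => h2 (by rw [h])
  rw [get_path_by_locs]
  rw [dif_neg hab]
  split
  · next key snd heq =>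
      rw [pick_vert a b f h1 h2] at heq
      simp only [Option.some.injEq, Prod.mk.injEq] at heq
      rw [heq.1]
  · next key p heq =>
      rw [pick_vert a b f h1 h2] at heq
      simp at heq
  · next heq =>
      rw [pick_vert a b f h1 h2] at heq
      simp at heq

theorem A_step_horiz (a b : Int × Int) (rest : List (Int × Int)) (f : Int × Int) (d : Bool)
    (h2 : a.2 = b.2) (h1 : a.1 ≠ b.1) :
    get_path_by_locs (a :: b :: rest) f d = pvH a b ++ ("A" ++ get_path_by_locs (b :: rest) f d) := by
  have hab : a ≠ b := fun h => h1 (by rw [h])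
  rw [get_path_by_locs]
  rw [dif_neg hab]
  split
  · next key snd heq =>
      rw [pick_horiz a b f h2 h1] at heq
      simp only [Option.some.injEq, Prod.mk.injEq] at heq
      rw [heq.1]
  · next key p heq =>
      rw [pick_horiz a b f h2 h1] at heq
      simp at heq
  · next heq =>
      rw [pick_horiz a b f h2 h1] at heq
      simp at heq

theorem A_step (a b : Int × Int) (rest : List (Int × Int)) (f : Int × Int) (d : Bool) :
    get_path_by_locs (a :: b :: rest) f d = pvSeg a b f ++ get_path_by_locs (b :: rest) f d := by
  by_cases hab : a = b
  · subst hab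
    rw [get_path_by_locs]
    rw [dif_pos rfl, pvSeg_self]
  · by_cases h1 : a.1 = b.1
    · have h2 : a.2 ≠ b.2 := fun hh => hab (Prod.ext h1 hh)
      rw [A_step_vert a b rest f d h1 h2, pvSeg, if_neg (by intro hc; exact hc.1 (by omega)),
          pvH_empty a b h1]
      simp [String.append_assoc]
    · by_cases h2 : a.2 = b.2
      · rw [A_step_horiz a b rest f d h2 h1, pvSeg, if_neg (by intro hc; exact hc.2.1 (by omega)),
            pvV_empty a b h2]
        simp [String.append_assoc]
      · by_cases hf : ((b.1, a.2) : Int × Int) = f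
        · rw [get_path_by_locs, dif_neg hab]
          split
          · next key snd heq =>
              rw [pick_mixed_forb a b f h1 h2 hf] at heq; simp at heq
          · next key p heq =>
              rw [pick_mixed_forb a b f h1 h2 hf] at heq
              simp only [Option.some.injEq, Prod.mk.injEq] at heq
              rw [← heq.1, ← heq.2.2]
              rw [A_step_horiz (a.1, b.2) b rest f d rfl h1]
              have hH : pvH (a.1, b.2) b = pvH a b := rfl
              rw [hH, pvSeg, if_pos ⟨by omega, by omega, hf⟩]
              simp [String.append_assoc]
          · next heq =>
              rw [pick_mixed_forb a b f h1 h2 hf] at heq; simp at heq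
        · rw [get_path_by_locs, dif_neg hab]
          split
          · next key snd heq =>
              rw [pick_mixed_ok a b f h1 h2 hf] at heq; simp at heq
          · next key p heq =>
              rw [pick_mixed_ok a b f h1 h2 hf] at heq
              simp only [Option.some.injEq, Prod.mk.injEq] at heq
              rw [← heq.1, ← heq.2.2]
              rw [A_step_vert (b.1, a.2) b rest f d rfl h2]
              have hV : pvV (b.1, a.2) b = pvV a b := rfl
              rw [hV, pvSeg, if_neg (fun hc => hf hc.2.2)]
              simp [String.append_assoc]
          · next heq =>
              rw [pick_mixed_ok a b f h1 h2 hf] at heq; simp at heq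

theorem main_equiv (locs : List (Int × Int)) (f : Int × Int) (d : Bool) (h : locs ≠ []) :
    get_path_by_locs locs f d = get_path_by_locs_alt locs f d := by
  induction locs with
  | nil => exact absurd rfl h
  | cons a tl ih =>
    cases tl with
    | nil => rw [get_path_by_locs]; rfl
    | cons b rest =>
      rw [A_step a b rest f d, alt_cons a b rest f d, ih (by simp)]

-- ===== VERDICT =====
theorem get_path_by_locs_spec : Claim_equal_get_path_by_locs := by
  intro locs forbidden debug _ hpre
  unfold Spec_get_path_by_locs
  exact main_equiv locs forbidden debug hpre
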